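-- pv_equiv track=rewrite | github.com/sky7th/BOJ | programmers/코딩테스트 고득점 Kit/이분탐색.py | solution
-- ===== SOURCE A (Python) =====
-- def solution(budgets, M):
--     answer=0
--     left = 0
--     right = max(budgets)
--
--     while right >= left:
--         mid = (left + right) // 2
--         res = 0
--         for b in budgets:
--             if mid > b:
--                 res += b
--             else:
--                 res += mid
--         if res > M:
--             right = mid-1
--         else:
--             left = mid+1
--             answer = mid
--
--     return answer
-- ===== SOURCE B (Python) =====
-- def solution(budgets, M):
--     bs = sorted(budgets)
--     prefix = 0
--     rem = len(bs)
--     for b in bs: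
--         if prefix + b * rem > M:
--             return (M - prefix) // rem
--         prefix += b
--         rem -= 1
--     return bs[-1]
-- ===== Notes on version B (the rewrite author's own statement) =====
-- stated objective: alternative
-- what changed: Replaces the binary search over the cap (each probe re-summing the whole list) with one sort plus a single prefix-sum scan that computes the optimal cap in closed form by floor division; Pre_ excludes the empty list (A raises ValueError) and the inputs with a negative limit M or an all-negative budget list, where no nonnegative uniform cap is feasible and either answer (A's 0, B's largest cap whose cost stays within M, possibly negative) is a defensible choice on an unspecified corner.
-- outside the precondition, e.g. on solution([-3], 5): A returns 0, B returns -3; on solution([1], -1): A returns 0, B returns -1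
import Mathlib
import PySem

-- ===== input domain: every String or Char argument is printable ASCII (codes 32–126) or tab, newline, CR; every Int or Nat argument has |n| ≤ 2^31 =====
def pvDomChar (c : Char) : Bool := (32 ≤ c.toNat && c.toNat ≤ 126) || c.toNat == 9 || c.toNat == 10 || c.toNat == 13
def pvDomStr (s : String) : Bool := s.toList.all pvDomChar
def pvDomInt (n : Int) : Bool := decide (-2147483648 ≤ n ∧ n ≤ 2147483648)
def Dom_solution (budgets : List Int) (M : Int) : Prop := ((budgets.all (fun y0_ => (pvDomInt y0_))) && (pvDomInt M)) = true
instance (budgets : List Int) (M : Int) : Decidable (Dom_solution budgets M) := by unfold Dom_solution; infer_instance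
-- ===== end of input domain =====

-- B replaces A's binary search over the cap (each probe re-summing the list) by one sort plus a
-- single prefix-sum scan that computes the optimal cap in closed form by floor division.

-- ===== PORT A =====
-- the inner 'for b in budgets' accumulation of A
def innerRes (budgets : List Int) (mid : Int) : Int :=
  budgets.foldl (fun res b => if mid > b then res + b else res + mid) 0

-- the 'while right >= left' loop of A
def loopA (budgets : List Int) (M left right answer : Int) : Int :=
  if h : right ≥ left then
    let mid := PySem.Int.floordiv (left + right) 2
    let res := innerRes budgets mid
    if res > M then loopA budgets M left (mid - 1) answer
    else loopA budgets M (mid + 1) right mid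
  else answer
termination_by (right + 1 - left).toNat
decreasing_by
  · have hb := PySem.Int.floordiv_two_mid_bounds h
    omega
  · have hb := PySem.Int.floordiv_two_mid_bounds h
    omega

def solution (budgets : List Int) (M : Int) : Int :=
  match PySem.List.max? budgets (fun y => y) with
  | none => 0  -- unreachable under Pre_solution: max([]) raises ValueError
  | some r => loopA budgets M 0 r 0

-- ===== PORT B =====
-- B's 'for b in bs' scan over the sorted list with running prefix sum and remaining count;
-- 'none' means the loop fell through without returning
def goB (M : Int) : List Int → Int → Int → Option Int
  | [], _, _ => none
  | b :: t, pre, rem =>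
    if pre + b * rem > M then some (PySem.Int.floordiv (M - pre) rem)
    else goB M t (pre + b) (rem - 1)

def solution_alt (budgets : List Int) (M : Int) : Int :=
  let bs := PySem.List.sorted budgets (fun y => y) false
  match goB M bs 0 bs.length with
  | some c => c
  | none =>
    match PySem.List.pyGet? bs (-1) with
    | none => 0  -- unreachable under Pre_solution: bs[-1] raises IndexError
    | some last => last

-- ===== PRECONDITION & SPEC =====
-- Pre_ excludes the empty list, on which A raises ValueError (max of empty sequence), and the
-- inputs with a negative limit M or an all-negative budget list: there no nonnegative uniform cap
-- is feasible and either answer (A's 0, B's largest cap whose cost stays within M, possibly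
-- negative) is a defensible choice on this unspecified corner.
def Pre_solution (budgets : List Int) (M : Int) : Prop :=
  budgets ≠ [] ∧ 0 ≤ M ∧ ∃ b ∈ budgets, 0 ≤ b
instance (budgets : List Int) (M : Int) : Decidable (Pre_solution budgets M) := by
  unfold Pre_solution; infer_instance
def pvWitness_solution : List Int × Int := ([1, 3, 2, 5], 9)

def Spec_solution (budgets : List Int) (M : Int) (out : Int) : Prop := out = solution_alt budgets M
instance (budgets : List Int) (M : Int) (out : Int) : Decidable (Spec_solution budgets M out) := by
  unfold Spec_solution; infer_instance

-- ===== CLAIM (what is proved, stated in full; the proofs are below) =====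
def Claim_equal_solution : Prop := ∀ (budgets : List Int) (M : Int), Dom_solution budgets M → Pre_solution budgets M → Spec_solution budgets M (solution budgets M)

-- ===== LEMMAS AND PROOFS =====
-- the cost of cap c: sum over budgets of min c b
def capCost (budgets : List Int) (c : Int) : Int :=
  (budgets.map (fun b => min c b)).sum

-- characterization of both results: the largest feasible cap in [0, m]
def GoodOut (budgets : List Int) (M m out : Int) : Prop :=
  0 ≤ out ∧ out ≤ m ∧ capCost budgets out ≤ M ∧
    (m ≤ out ∨ capCost budgets (out + 1) > M)

theorem foldl_innerRes (c : Int) : ∀ (l : List Int) (init : Int),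
    l.foldl (fun res b => if c > b then res + b else res + c) init = init + capCost l c := by
  intro l
  induction l with
  | nil => intro init; simp [capCost]
  | cons b t ih =>
    intro init
    simp only [List.foldl_cons, ih, capCost, List.map_cons, List.sum_cons]
    split_ifs with h <;> omega

theorem innerRes_eq (budgets : List Int) (c : Int) : innerRes budgets c = capCost budgets c := by
  simpa using foldl_innerRes c budgets 0

theorem capCost_mono (budgets : List Int) {c c' : Int} (h : c ≤ c') :
    capCost budgets c ≤ capCost budgets c' := by
  induction budgets with
  | nil => simp [capCost]
  | cons b t ih => simp only [capCost, List.map_cons, List.sum_cons] at *; omega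

theorem capCost_perm {l l' : List Int} (h : l.Perm l') (c : Int) :
    capCost l c = capCost l' c :=
  List.Perm.sum_eq (h.map _)

theorem capCost_append (l l' : List Int) (c : Int) :
    capCost (l ++ l') c = capCost l c + capCost l' c := by
  simp [capCost]

theorem capCost_eq_sum {l : List Int} {x : Int} (h : ∀ d ∈ l, d ≤ x) :
    capCost l x = l.sum := by
  induction l with
  | nil => rfl
  | cons b t ih =>
    simp only [capCost, List.map_cons, List.sum_cons] at *
    have := h b (by simp)
    have := ih (fun d hd => h d (by simp [hd]))
    omega

theorem capCost_eq_const {l : List Int} {x : Int} (h : ∀ y ∈ l, x ≤ y) :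
    capCost l x = x * l.length := by
  induction l with
  | nil => simp [capCost]
  | cons b t ih =>
    simp only [capCost, List.map_cons, List.sum_cons, List.length_cons] at *
    have := h b (by simp)
    have := ih (fun d hd => h d (by simp [hd]))
    have hmin : min x b = x := min_eq_left (h b (by simp))
    push_cast
    rw [hmin, this]; ring

theorem goodOut_unique {budgets : List Int} {M m o1 o2 : Int}
    (h1 : GoodOut budgets M m o1) (h2 : GoodOut budgets M m o2) : o1 = o2 := by
  obtain ⟨ho1, ho1m, hc1, hl1⟩ := h1
  obtain ⟨ho2, ho2m, hc2, hl2⟩ := h2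
  rcases lt_trichotomy o1 o2 with h | h | h
  · have : capCost budgets (o1 + 1) ≤ capCost budgets o2 := capCost_mono budgets (by omega)
    omega
  · exact h
  · have : capCost budgets (o2 + 1) ≤ capCost budgets o1 := capCost_mono budgets (by omega)
    omega

theorem loopA_good (budgets : List Int) (M m : Int) (hm : 0 ≤ m) (hfeas0 : capCost budgets 0 ≤ M) :
    ∀ left right answer, 0 ≤ left → right ≤ m →
    (∀ c, right < c → c ≤ m → capCost budgets c > M) →
    ((left = 0 ∧ answer = 0) ∨
      (answer = left - 1 ∧ 0 ≤ answer ∧ answer ≤ m ∧ capCost budgets answer ≤ M)) →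
    GoodOut budgets M m (loopA budgets M left right answer) := by
  intro left right answer
  fun_induction loopA budgets M left right answer with
  | case1 left right answer h mid res hres ih =>
    intro hl hr habove hans
    have hb := PySem.Int.floordiv_two_mid_bounds h
    apply ih hl (by omega)
    · intro c hc1 hc2
      have : capCost budgets mid ≤ capCost budgets c := capCost_mono budgets (by omega)
      have : res = capCost budgets mid := innerRes_eq budgets mid
      omega
    · exact hans
  | case2 left right answer h mid res hres ih =>
    intro hl hr habove hans
    have hb := PySem.Int.floordiv_two_mid_bounds h
    apply ih (by omega) hr habove
    right
    refine ⟨by omega, by omega, by omega, ?_⟩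
    have : res = capCost budgets mid := innerRes_eq budgets mid
    omega
  | case3 left right answer h =>
    intro hl hr habove hans
    rcases hans with ⟨hl0, ha0⟩ | ⟨ha, ha0, ham, hac⟩
    · -- left = 0, right < 0: feasibility of 0 contradicts habove unless m ≤ 0 with right < left
      by_cases hm0 : m = 0
      · exact ⟨by omega, by omega, by simpa [ha0, hm0] using hfeas0, Or.inl (by omega)⟩
      · exact absurd (habove 0 (by omega) hm) (by omega)
    · refine ⟨ha0, ham, hac, ?_⟩
      by_cases hcase : m ≤ answer
      · exact Or.inl hcase
      · exact Or.inr (habove (answer + 1) (by omega) (by omega))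

theorem goB_some_good (M m : Int) (bs : List Int) (hpw : bs.Pairwise (· ≤ ·))
    (hmax : ∀ y ∈ bs, y ≤ m) :
    ∀ (rest done : List Int), bs = done ++ rest →
    done.sum ≤ M →
    (∀ d ∈ done, d * (rest.length : Int) ≤ M - done.sum) →
    ∀ c, goB M rest done.sum (rest.length : Int) = some c →
    GoodOut bs M m c := by
  intro rest
  induction rest with
  | nil => intro done hbs hsle hinv c hc; simp [goB] at hc
  | cons b t ih =>
    intro done hbs hsle hinv c hc
    have hrem : (0:Int) < ((b :: t).length : Int) := by simp
    have hbbs : b ∈ bs := by simp [hbs]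
    obtain ⟨hpwdone, hpwrest, hcross⟩ := List.pairwise_append.mp (hbs ▸ hpw)
    rw [goB] at hc
    by_cases htrig : done.sum + b * ((b :: t).length : Int) > M
    · rw [if_pos htrig, Option.some_inj] at hc
      set rem : Int := ((b :: t).length : Int) with hremdef
      have hcval : c = PySem.Int.floordiv (M - done.sum) rem := hc.symm
      subst hcval
      set c : Int := PySem.Int.floordiv (M - done.sum) rem with hcdef
      have hc1 : c * rem ≤ M - done.sum :=
        (PySem.Int.le_floordiv_iff_mul_le hrem).mp (le_refl c)
      have hc2 : M - done.sum < (c + 1) * rem :=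
        (PySem.Int.floordiv_lt_iff_lt_mul hrem).mp (lt_add_one c)
      have hcb : c < b := (PySem.Int.floordiv_lt_iff_lt_mul hrem).mpr (by omega)
      have hc0 : 0 ≤ c := (PySem.Int.le_floordiv_iff_mul_le hrem).mpr (by omega)
      have hdone : ∀ d ∈ done, d ≤ c := fun d hd =>
        (PySem.Int.le_floordiv_iff_mul_le hrem).mpr (hinv d hd)
      have hseg : ∀ x, (∀ d ∈ done, d ≤ x) → x ≤ b →
          capCost bs x = done.sum + x * rem := by
        intro x hdx hxb
        rw [hbs, capCost_append, capCost_eq_sum hdx, capCost_eq_const ?_]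
        intro y hy
        rcases List.mem_cons.mp hy with rfl | hy'
        · exact hxb
        · have : b ≤ y := (List.pairwise_cons.mp hpwrest).1 y hy'
          omega
      have hcostc : capCost bs c ≤ M := by
        rw [hseg c hdone (by omega)]; omega
      have hcostc1 : M < capCost bs (c + 1) := by
        rw [hseg (c + 1) (fun d hd => by have := hdone d hd; omega) (by omega)]; omega
      have hcm : c < m := lt_of_lt_of_le hcb (hmax b hbbs)
      exact ⟨hc0, by omega, hcostc, Or.inr hcostc1⟩
    · rw [if_neg htrig] at hc
      have hcall := ih (done ++ [b]) (by rw [hbs, List.append_assoc]; rfl) ?_ ?_ c ?_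
      · exact hcall
      · simp only [List.sum_append, List.sum_cons, List.sum_nil]
        simp only [List.length_cons] at htrig
        push_cast at htrig
        by_cases hb : 0 ≤ b
        · nlinarith [Int.natCast_nonneg t.length]
        · omega
      · intro d hd
        have hdb : d ≤ b := by
          rcases List.mem_append.mp hd with hd' | hd'
          · exact hcross d hd' b (by simp)
          · simp at hd'; omega
        have h1 : d * (t.length : Int) ≤ b * (t.length : Int) :=
          mul_le_mul_of_nonneg_right hdb (by positivity)
        simp only [List.length_cons] at htrig
        push_cast at htrig ⊢
        simp
        nlinarith
      · have e1 : (done ++ [b]).sum = done.sum + b := by simp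
        have e2 : ((b :: t).length : Int) - 1 = (t.length : Int) := by simp
        rw [e1, ← e2]
        exact hc

theorem goB_none_sum (M : Int) : ∀ (rest : List Int) (pre : Int),
    pre ≤ M →
    goB M rest pre (rest.length : Int) = none → pre + rest.sum ≤ M := by
  intro rest
  induction rest with
  | nil => intro pre hpre _; simpa using hpre
  | cons b t ih =>
    intro pre hpre hnone
    rw [goB] at hnone
    by_cases htrig : pre + b * ((b :: t).length : Int) > M
    · rw [if_pos htrig] at hnone; exact absurd hnone (by simp)
    · rw [if_neg htrig] at hnone
      have hpreb : pre + b ≤ M := by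
        simp only [List.length_cons] at htrig
        push_cast at htrig
        by_cases hb : 0 ≤ b
        · nlinarith [Int.natCast_nonneg t.length]
        · omega
      have e2 : ((b :: t).length : Int) - 1 = (t.length : Int) := by simp
      rw [e2] at hnone
      have := ih (pre + b) hpreb hnone
      simp only [List.sum_cons]
      omega

theorem max?_id_mem {budgets : List Int} {m : Int}
    (hm : PySem.List.max? budgets (fun y => y) = some m) : m ∈ budgets := by
  cases budgets with
  | nil =>
    rw [(PySem.List.max?_eq_none_iff ([] : List Int) (fun y => y)).mpr rfl] at hm
    exact absurd hm.symm (by simp)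
  | cons x t =>
    rw [PySem.List.max?_id_cons, Option.some_inj] at hm
    subst hm
    rcases PySem.List.foldl_max_mem t x with h | h
    · rw [h]; exact List.mem_cons_self
    · exact List.mem_cons_of_mem _ h

theorem pairwise_le_getLast : ∀ (l : List Int) (h : l ≠ []),
    l.Pairwise (· ≤ ·) → ∀ y ∈ l, y ≤ l.getLast h := by
  intro l
  induction l with
  | nil => intro h; exact absurd rfl h
  | cons a t ih =>
    intro h hpw y hy
    rcases List.pairwise_cons.mp hpw with ⟨ha, hpt⟩
    by_cases htne : t = []
    · subst htne
      simp at hy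
      simp [hy]
    · rw [List.getLast_cons htne]
      rcases List.mem_cons.mp hy with rfl | hy'
      · exact ha _ (List.getLast_mem htne)
      · exact ih htne hpt y hy'

theorem goodOut_perm {l l' : List Int} (h : l.Perm l') (M m out : Int)
    (hg : GoodOut l M m out) : GoodOut l' M m out := by
  unfold GoodOut at *
  rw [capCost_perm h out, capCost_perm h (out + 1)] at hg
  exact hg

theorem capCost_zero_nonpos (l : List Int) : capCost l 0 ≤ 0 := by
  induction l with
  | nil => simp [capCost]
  | cons b t ih =>
    simp only [capCost, List.map_cons, List.sum_cons] at *
    have : min 0 b ≤ 0 := min_le_left 0 b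
    omega

theorem solution_good {budgets : List Int} {M m : Int}
    (hM : 0 ≤ M) (hm0 : 0 ≤ m)
    (hm : PySem.List.max? budgets (fun y => y) = some m) :
    GoodOut budgets M m (solution budgets M) := by
  unfold solution
  rw [hm]
  exact loopA_good budgets M m hm0 (le_trans (capCost_zero_nonpos budgets) hM) 0 m 0 (le_refl 0)
    (le_refl m) (fun c h1 h2 => absurd h2 (by omega)) (Or.inl ⟨rfl, rfl⟩)

theorem solution_alt_good {budgets : List Int} {M m : Int} (hne : budgets ≠ [])
    (hM : 0 ≤ M) (hm0 : 0 ≤ m)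
    (hm : PySem.List.max? budgets (fun y => y) = some m) :
    GoodOut budgets M m (solution_alt budgets M) := by
  unfold solution_alt
  have hperm := PySem.List.sorted_perm budgets (fun y => y) false
  set bs := PySem.List.sorted budgets (fun y => y) false with hbsdef
  have hbsne : bs ≠ [] := by
    intro h
    rw [h] at hperm
    exact hne hperm.symm.eq_nil
  have hpw : bs.Pairwise (· ≤ ·) := PySem.List.sorted_pairwise budgets (fun y => y)
  have hmaxb : ∀ y ∈ budgets, y ≤ m := fun y hy => PySem.List.max?_isMax hm y hy
  have hmax : ∀ y ∈ bs, y ≤ m := fun y hy => hmaxb y (hperm.mem_iff.mp hy)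
  have hLm : bs.getLast hbsne = m := by
    apply le_antisymm
    · exact hmaxb _ (hperm.mem_iff.mp (List.getLast_mem hbsne))
    · exact pairwise_le_getLast bs hbsne hpw m (hperm.mem_iff.mpr (max?_id_mem hm))
  have hget : PySem.List.pyGet? bs (-1) = some m := by
    rw [PySem.List.pyGet?_neg_one, List.getLast?_eq_some_getLast hbsne, hLm]
  apply goodOut_perm hperm
  cases hgo : goB M bs 0 (bs.length : Int) with
  | some c =>
    have := goB_some_good M m bs hpw hmax bs [] rfl (by simpa using hM) (by simp) c
      (by simpa using hgo)
    simpa [hgo] using this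
  | none =>
    have hsum : bs.sum ≤ M := by
      have := goB_none_sum M bs 0 hM (by simpa using hgo)
      omega
    simp only [hgo, hget]
    exact ⟨hm0, le_refl m, by rw [capCost_eq_sum hmax]; exact hsum, Or.inl (le_refl m)⟩

-- ===== VERDICT (by name: the statement is the Claim_ definition above) =====
theorem solution_spec : Claim_equal_solution := by
  intro budgets M _ hpre
  obtain ⟨hne, hM, b0, hb0mem, hb0⟩ := hpre
  unfold Spec_solution
  obtain ⟨m, hm⟩ : ∃ m, PySem.List.max? budgets (fun y => y) = some m := by
    cases h : PySem.List.max? budgets (fun y => y) with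
    | none => exact absurd ((PySem.List.max?_eq_none_iff _ _).mp h) hne
    | some m => exact ⟨m, rfl⟩
  have hm0 : 0 ≤ m := le_trans hb0 (PySem.List.max?_isMax hm b0 hb0mem)
  exact goodOut_unique (solution_good hM hm0 hm) (solution_alt_good hne hM hm0 hm)
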